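-- pv_equiv track=rewrite | github.com/alexandermorgan/BatchBPE | batchbpe/quick.py | merge_batch_get_stats
-- ===== SOURCE A (Python) =====
-- from collections import defaultdict
--
-- def merge_batch_get_stats(ids, pairs):
--     counts = defaultdict(int)
--     for chunk, num in ids:
--         last_index = len(chunk) - 1
--         i = 0
--         while i < last_index:
--             j = i + 1
--             token = pairs.get((chunk[i], chunk[j]))
--             if token is not None:
--                 chunk[i] = token
--                 del chunk[j]
--                 last_index -= 1
--             if i:
--                 counts[(chunk[i-1], chunk[i])] += num
--             i = j
--         if i and i == last_index:
--             counts[(chunk[-2], chunk[i])] += num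
--     return counts
-- ===== SOURCE B (Python) =====
-- from collections import defaultdict
--
-- def merge_batch_get_stats(ids, pairs):
--     counts = defaultdict(int)
--     for chunk, num in ids:
--         # pass 1: greedy merge scan building a fresh list
--         merged = []
--         i = 0
--         n = len(chunk)
--         while i < n:
--             token = pairs.get((chunk[i], chunk[i + 1])) if i + 1 < n else None
--             if token is not None:
--                 merged.append(token)
--                 i += 2
--             else:
--                 merged.append(chunk[i])
--                 i += 1
--         chunk[:] = merged  # same in-place mutation as A
--         # pass 2: count adjacent pairs of the merged list
--         for x, y in zip(merged, merged[1:]):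
--             counts[(x, y)] += num
--     return counts
-- ===== Notes on version B (the rewrite author's own statement) =====
-- stated objective: simpler
-- what changed: A's single interleaved while-loop that merges in place (chunk[i]=token; del chunk[j]; shrinking last_index) while counting pairs read from the partially mutated list is split into two plain passes per chunk: a greedy scan building a fresh merged list, then a straightforward count of the merged list's adjacent pairs via zip.
import Mathlib
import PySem

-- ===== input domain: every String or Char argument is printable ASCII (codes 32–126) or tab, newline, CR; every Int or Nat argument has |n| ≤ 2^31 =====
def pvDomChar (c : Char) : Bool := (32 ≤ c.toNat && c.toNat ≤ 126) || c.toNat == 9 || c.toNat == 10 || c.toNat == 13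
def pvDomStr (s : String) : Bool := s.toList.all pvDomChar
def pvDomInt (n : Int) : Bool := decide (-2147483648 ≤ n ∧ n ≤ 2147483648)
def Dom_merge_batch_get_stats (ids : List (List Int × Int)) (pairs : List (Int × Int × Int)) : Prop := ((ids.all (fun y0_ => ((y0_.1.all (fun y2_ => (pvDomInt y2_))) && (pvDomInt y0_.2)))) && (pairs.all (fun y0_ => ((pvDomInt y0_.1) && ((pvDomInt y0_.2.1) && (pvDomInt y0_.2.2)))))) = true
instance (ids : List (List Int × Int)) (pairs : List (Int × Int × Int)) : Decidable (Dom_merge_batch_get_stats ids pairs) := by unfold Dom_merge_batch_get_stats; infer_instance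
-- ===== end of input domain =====

-- B splits A's interleaved merge-and-count while-loop (with its in-place chunk[i]=token /
-- del chunk[j] index surgery) into two plain passes per chunk: a greedy scan building the merged
-- list, then a count of the merged list's adjacent pairs.  Equal return value; the Python B also
-- performs the same in-place mutation of each chunk (chunk[:] = merged) as A does.


-- ===== PORT A =====

-- pairs.get((a, b)) : the dict[(int,int) -> int] is the association list 'pairs', first match wins
def pairGet (pairs : List (Int × Int × Int)) (a b : Int) : Option Int :=
  (pairs.find? (fun e => e.1 == a && e.2.1 == b)).map (·.2.2)

-- 'del chunk[j]' (always in range in A, so the .getD fallback never fires)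
def delAt (chunk : List Int) (j : Int) : List Int :=
  ((PySem.List.pop? chunk j).map (·.2)).getD chunk

-- the 'if i: counts[(chunk[i-1], chunk[i])] += num' line of A
def bumpIf (counts : PySem.Dict (Int × Int) Int) (i : Int) (chunk : List Int) (num : Int) :
    PySem.Dict (Int × Int) Int :=
  if i ≠ 0 then
    counts.modify (PySem.List.pyGetD chunk (i - 1) 0, PySem.List.pyGetD chunk i 0) 0 (· + num)
  else counts

-- the while-loop of A, state (chunk, last_index, i, counts); indices are Int as in Python
-- (j = i + 1 inlined; the pyGetD defaults never fire: every index A reads is in range)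
def aLoop (pairs : List (Int × Int × Int)) (num : Int) (chunk : List Int)
    (lastIndex i : Int) (counts : PySem.Dict (Int × Int) Int) : PySem.Dict (Int × Int) Int :=
  if _h : i < lastIndex then
    match pairGet pairs (PySem.List.pyGetD chunk i 0) (PySem.List.pyGetD chunk (i + 1) 0) with
    | some token =>
        aLoop pairs num (delAt (PySem.List.pySetD chunk i token) (i + 1)) (lastIndex - 1) (i + 1)
          (bumpIf counts i (delAt (PySem.List.pySetD chunk i token) (i + 1)) num)
    | none =>
        aLoop pairs num chunk lastIndex (i + 1) (bumpIf counts i chunk num)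
  else
    if i ≠ 0 ∧ i = lastIndex then
      counts.modify (PySem.List.pyGetD chunk (-2) 0, PySem.List.pyGetD chunk i 0) 0 (· + num)
    else counts
termination_by (lastIndex - i).toNat
decreasing_by all_goals omega

def merge_batch_get_stats (ids : List (List Int × Int)) (pairs : List (Int × Int × Int)) : List (Int × Int × Int) :=
  (ids.foldl (fun counts ci => aLoop pairs ci.2 ci.1 ((ci.1.length : Int) - 1) 0 counts)
      PySem.Dict.empty).items.map (fun e => (e.1.1, e.1.2, e.2))

-- ===== PORT B =====

-- greedy merge pass over the remaining suffix of a chunk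
def bMerge (pairs : List (Int × Int × Int)) : List Int → List Int
  | a :: b :: t =>
      match pairGet pairs a b with
      | some token => token :: bMerge pairs t
      | none => a :: bMerge pairs (b :: t)
  | [a] => [a]
  | [] => []

def merge_batch_get_stats_alt (ids : List (List Int × Int)) (pairs : List (Int × Int × Int)) : List (Int × Int × Int) :=
  (ids.foldl (fun counts ci =>
      ((bMerge pairs ci.1).zip (bMerge pairs ci.1).tail).foldl
        (fun c p => c.modify p 0 (· + ci.2)) counts)
      PySem.Dict.empty).items.map (fun e => (e.1.1, e.1.2, e.2))

-- ===== PRECONDITION & SPEC =====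
def Spec_merge_batch_get_stats (ids : List (List Int × Int)) (pairs : List (Int × Int × Int)) (out : List (Int × Int × Int)) : Prop := out = merge_batch_get_stats_alt ids pairs
instance (ids : List (List Int × Int)) (pairs : List (Int × Int × Int)) (out : List (Int × Int × Int)) : Decidable (Spec_merge_batch_get_stats ids pairs out) := by unfold Spec_merge_batch_get_stats; infer_instance

-- ===== CLAIM (what is proved, stated in full; the proofs are below) =====
def Claim_equal_merge_batch_get_stats : Prop := ∀ (ids : List (List Int × Int)) (pairs : List (Int × Int × Int)), Dom_merge_batch_get_stats ids pairs → Spec_merge_batch_get_stats ids pairs (merge_batch_get_stats ids pairs)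

-- ===== LEMMAS AND PROOFS =====

-- counting adjacent pairs of a list, carrying the previous element (the shape A's loop produces)
def countAdj (num : Int) (prev : Option Int) (m : List Int) (c : PySem.Dict (Int × Int) Int) :
    PySem.Dict (Int × Int) Int :=
  match m with
  | [] => c
  | x :: r =>
      countAdj num (some x) r
        (match prev with
         | some q => c.modify (q, x) 0 (· + num)
         | none => c)

theorem countAdj_some (num : Int) (m : List Int) : ∀ (q : Int) (c : PySem.Dict (Int × Int) Int),
    countAdj num (some q) m c = ((q :: m).zip m).foldl (fun c p => c.modify p 0 (· + num)) c := by
  induction m with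
  | nil => intro q c; rfl
  | cons x r ih => intro q c; simp only [countAdj, List.zip_cons_cons, List.foldl_cons, ih]

theorem countAdj_none (num : Int) (m : List Int) (c : PySem.Dict (Int × Int) Int) :
    countAdj num none m c = (m.zip m.tail).foldl (fun c p => c.modify p 0 (· + num)) c := by
  cases m with
  | nil => rfl
  | cons x r => simp only [countAdj, countAdj_some, List.tail_cons]

theorem pyGetD_append_len (p : List Int) (x : Int) (t : List Int) (d : Int) :
    PySem.List.pyGetD (p ++ x :: t) (p.length : Int) d = x := by
  simp [List.getD_eq_getElem?_getD]

theorem pyGetD_append_len_succ (p : List Int) (x y : Int) (t : List Int) (d : Int) :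
    PySem.List.pyGetD (p ++ x :: y :: t) ((p.length : Int) + 1) d = y := by
  have h : ((p.length : Int) + 1) = ((p.length + 1 : Nat) : Int) := by push_cast; ring
  rw [h, PySem.List.pyGetD_natCast]
  simp [List.getD_eq_getElem?_getD]

theorem pyGetD_append_len_pred (p : List Int) (hp : p ≠ []) (l : List Int) (d : Int) :
    PySem.List.pyGetD (p ++ l) ((p.length : Int) - 1) d = p.getLast hp := by
  have hlen : 1 ≤ p.length := List.length_pos_of_ne_nil hp
  have h : ((p.length : Int) - 1) = ((p.length - 1 : Nat) : Int) := by omega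
  rw [h, PySem.List.pyGetD_natCast, List.getD_eq_getElem?_getD,
      List.getElem?_append_left (by omega), List.getLast_eq_getElem,
      List.getElem?_eq_getElem (by omega)]
  rfl

-- one step of A's surgery: with chunk = p ++ a :: b :: t at i = p.length,
-- chunk[i] = token then del chunk[i+1] yields p ++ token :: t
theorem surgery (p : List Int) (a b : Int) (t : List Int) (token : Int) :
    delAt (PySem.List.pySetD (p ++ a :: b :: t) (p.length : Int) token) ((p.length : Int) + 1)
      = p ++ token :: t := by
  have hset : PySem.List.pySetD (p ++ a :: b :: t) (p.length : Int) token = p ++ token :: b :: t := by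
    rw [PySem.List.pySetD_natCast, List.set_append_right _ _ (Nat.le_refl p.length)]
    simp
  have hcast : ((p.length : Int) + 1) = ((p.length + 1 : Nat) : Int) := by push_cast; ring
  rw [delAt, hset, hcast, PySem.List.pop?_natCast _ _ (by simp)]
  simp [List.eraseIdx_append_of_length_le (Nat.le_succ_of_le (Nat.le_refl p.length))]

theorem bumpIf_append (c : PySem.Dict (Int × Int) Int) (p : List Int) (x : Int) (t : List Int) (num : Int) :
    bumpIf c (p.length : Int) (p ++ x :: t) num =
      (match p.getLast? with
       | some q => c.modify (q, x) 0 (· + num)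
       | none => c) := by
  cases hp : p with
  | nil => simp [bumpIf]
  | cons y r =>
      have hne : p ≠ [] := by simp [hp]
      rw [← hp]
      rw [bumpIf, if_pos (by simp [hp]; omega), pyGetD_append_len_pred p hne, pyGetD_append_len,
          List.getLast?_eq_some_getLast hne]

-- main invariant: A's loop on chunk = p ++ s at index i = p.length equals counting the
-- adjacent pairs of (bMerge s), with the last element of p as the previous element
theorem aLoop_eq (pairs : List (Int × Int × Int)) (num : Int) :
    ∀ (s p : List Int) (c : PySem.Dict (Int × Int) Int),
    aLoop pairs num (p ++ s) (((p ++ s).length : Int) - 1) (p.length : Int) c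
      = countAdj num p.getLast? (bMerge pairs s) c := by
  intro s
  induction s using bMerge.induct pairs with
  | case1 a b t token htok ih =>
      intro p c
      rw [aLoop, dif_pos (by simp; omega), pyGetD_append_len,
          (by exact pyGetD_append_len_succ p a b t 0 : PySem.List.pyGetD (p ++ a :: b :: t) ((p.length : Int) + 1) 0 = b),
          htok]
      dsimp only
      rw [surgery, bumpIf_append]
      have hlen : ((p ++ a :: b :: t).length : Int) - 1 - 1 = (((p ++ [token]) ++ t).length : Int) - 1 := by
        simp; omega
      have hidx : ((p.length : Int) + 1) = (((p ++ [token]).length : Nat) : Int) := by simp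
      have hchunk : p ++ token :: t = (p ++ [token]) ++ t := by simp
      rw [hlen, hidx, hchunk, ih, List.getLast?_concat]
      simp only [bMerge, htok, countAdj]
  | case2 a b t htok ih =>
      intro p c
      rw [aLoop, dif_pos (by simp; omega), pyGetD_append_len,
          (by exact pyGetD_append_len_succ p a b t 0 : PySem.List.pyGetD (p ++ a :: b :: t) ((p.length : Int) + 1) 0 = b),
          htok]
      dsimp only
      rw [bumpIf_append]
      have hidx : ((p.length : Int) + 1) = (((p ++ [a]).length : Nat) : Int) := by simp
      have hchunk : p ++ a :: b :: t = (p ++ [a]) ++ (b :: t) := by simp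
      rw [hidx, hchunk, ih, List.getLast?_concat]
      simp only [bMerge, htok, countAdj]
  | case3 a =>
      intro p c
      rw [aLoop, dif_neg (by simp)]
      cases hp : p with
      | nil => simp [bMerge, countAdj]
      | cons y r =>
          have hne : p ≠ [] := by simp [hp]
          have hpos : 0 < p.length := List.length_pos_of_ne_nil hne
          rw [← hp]
          rw [if_pos ⟨by simp [hp]; omega, by simp⟩, pyGetD_append_len,
              PySem.List.pyGetD_neg_ofNat _ 2 0 (by omega) (by simp; omega)]
          have h1 : ((p ++ [a])[(p ++ [a]).length - 2]?) = some (p.getLast hne) := by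
            rw [List.getElem?_append_left (by simp; omega)]
            rw [show (p ++ [a]).length - 2 = p.length - 1 from by simp]
            rw [← List.getLast?_eq_getElem?, List.getLast?_eq_some_getLast hne]
          have h2 := List.getElem?_eq_getElem (l := p ++ [a]) (i := (p ++ [a]).length - 2) (by simp)
          rw [h2] at h1
          rw [Option.some.injEq] at h1
          rw [h1, List.getLast?_eq_some_getLast hne]
          simp [bMerge, countAdj]
  | case4 =>
      intro p c
      rw [aLoop, dif_neg (by simp)]
      rw [if_neg (by simp; intro _; omega)]
      simp [bMerge, countAdj]

theorem fold_eq (pairs : List (Int × Int × Int)) :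
    ∀ (ids : List (List Int × Int)) (c : PySem.Dict (Int × Int) Int),
    ids.foldl (fun counts ci => aLoop pairs ci.2 ci.1 ((ci.1.length : Int) - 1) 0 counts) c
      = ids.foldl (fun counts ci =>
          ((bMerge pairs ci.1).zip (bMerge pairs ci.1).tail).foldl
            (fun c p => c.modify p 0 (· + ci.2)) counts) c := by
  intro ids
  induction ids with
  | nil => intro c; rfl
  | cons ci rest ih =>
      intro c
      rw [List.foldl_cons, List.foldl_cons, ih]
      congr 1
      have h := aLoop_eq pairs ci.2 ci.1 [] c
      simpa [countAdj_none] using h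

-- ===== VERDICT (by name: the statement is the Claim_ definition above) =====
theorem merge_batch_get_stats_spec : Claim_equal_merge_batch_get_stats := by
  intro ids pairs _
  unfold Spec_merge_batch_get_stats merge_batch_get_stats merge_batch_get_stats_alt
  rw [fold_eq]
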